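-- pv_equiv track=rewrite | github.com/mowzlisre/quizzy-backend | app/questions/question_process.py | assign_question_type
-- ===== SOURCE A (Python) =====
-- def assign_question_type(generated_questions, question_counts):
--     # Sort questions by answer length (longest first)
--     sorted_questions = sorted(generated_questions, key=lambda q: len(q.get("answer", "").split()), reverse=True)
--
--     # Create a flat list of types to assign, based on counts
--     types_to_assign = []
--     for q_type, count in question_counts.items():
--         types_to_assign.extend([q_type] * count)
--
--     # Assign types in the requested order
--     for i, question in enumerate(sorted_questions):
--         if i < len(types_to_assign):
--             question["type"] = types_to_assign[i]
--         else:
--             question["type"] = "shortAnswer"  # fallback type if more questions than counts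
--
--     return sorted_questions
-- ===== SOURCE B (Python) =====
-- def assign_question_type(generated_questions, question_counts):
--     # Same stable descending sort by answer word count.
--     sorted_questions = sorted(generated_questions, key=lambda q: len(q.get("answer", "").split()), reverse=True)
--     # Cumulative-bound table: the j-th type covers ranks [previous total, previous total + max(count,0)).
--     bounds = []
--     total = 0
--     for q_type, count in question_counts.items():
--         total += max(count, 0)
--         bounds.append((total, q_type))
--     # Each question's type is determined independently from its rank against the table
--     # (first bound exceeding the rank); no flat per-question type list is ever materialised.
--     for i, question in enumerate(sorted_questions):
--         question["type"] = next((t for b, t in bounds if i < b), "shortAnswer")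
--     return sorted_questions
-- ===== Notes on version B (the rewrite author's own statement) =====
-- stated objective: alternative
-- what changed: Instead of materialising a flat types_to_assign list with one entry per question (sum-of-counts memory) and indexing into it, B builds an O(k) cumulative-bound table from the counts and computes each sorted question's type independently as the first table bound exceeding its rank.
import Mathlib
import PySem

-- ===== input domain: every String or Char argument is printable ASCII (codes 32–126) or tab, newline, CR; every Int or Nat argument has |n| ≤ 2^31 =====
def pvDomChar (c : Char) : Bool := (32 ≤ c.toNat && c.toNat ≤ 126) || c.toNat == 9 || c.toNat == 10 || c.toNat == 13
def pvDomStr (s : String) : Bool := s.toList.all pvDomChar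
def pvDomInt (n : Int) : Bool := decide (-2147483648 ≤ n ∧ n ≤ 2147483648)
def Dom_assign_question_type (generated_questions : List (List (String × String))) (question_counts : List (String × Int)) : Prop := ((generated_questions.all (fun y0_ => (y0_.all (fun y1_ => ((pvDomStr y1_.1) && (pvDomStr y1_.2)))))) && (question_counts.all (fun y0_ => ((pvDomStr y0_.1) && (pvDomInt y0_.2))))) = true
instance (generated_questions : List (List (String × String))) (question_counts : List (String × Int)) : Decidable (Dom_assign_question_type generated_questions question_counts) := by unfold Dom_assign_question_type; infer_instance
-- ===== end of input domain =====

-- B drops A's flat per-question types list (one entry per counted question) in favour of an O(k)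
-- cumulative-bound table consulted per rank (alternative decomposition). Both Pythons mutate the
-- question dicts in place identically; the theorems are about the return value.

-- ===== PORT A =====
-- q["type"] = v  on a dict (association list): overwrite in place, append if absent
def pvSetType (q : List (String × String)) (v : String) : List (String × String) :=
  ((PySem.Dict.mk q).insert "type" v).items

-- sort key: len(q.get("answer", "").split())
def pvKey (q : List (String × String)) : Nat :=
  (PySem.Str.split₀ ((PySem.Dict.mk q).getD "answer" "")).length

def assign_question_type (generated_questions : List (List (String × String))) (question_counts : List (String × Int)) : List (List (String × String)) :=
  let sorted_questions := PySem.List.sorted generated_questions (fun q => pvKey q) true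
  let types_to_assign := question_counts.foldl
    (fun acc p => acc ++ List.replicate p.2.toNat p.1) ([] : List String)
  (PySem.List.enumerate sorted_questions).map (fun p =>
    if p.1 < (types_to_assign.length : Int) then
      pvSetType p.2 (PySem.List.pyGetD types_to_assign p.1 "")
    else
      pvSetType p.2 "shortAnswer")

-- ===== PORT B =====
def assign_question_type_alt (generated_questions : List (List (String × String))) (question_counts : List (String × Int)) : List (List (String × String)) :=
  let sorted_questions := PySem.List.sorted generated_questions (fun q => pvKey q) true
  -- bounds/total loop: bounds.append((total := total + max(count, 0), q_type))
  let bt := question_counts.foldl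
    (fun (acc : List (Int × String) × Int) p =>
      let total := acc.2 + max p.2 0
      (acc.1 ++ [(total, p.1)], total)) ([], 0)
  -- next((t for b, t in bounds if i < b), "shortAnswer") per enumerated question
  (PySem.List.enumerate sorted_questions).map (fun p =>
    pvSetType p.2 ((((bt.1).find? (fun e => decide (p.1 < e.1))).map Prod.snd).getD "shortAnswer"))

-- ===== PRECONDITION & SPEC =====
def Spec_assign_question_type (generated_questions : List (List (String × String))) (question_counts : List (String × Int)) (out : List (List (String × String))) : Prop := out = assign_question_type_alt generated_questions question_counts
instance (generated_questions : List (List (String × String))) (question_counts : List (String × Int)) (out : List (List (String × String))) : Decidable (Spec_assign_question_type generated_questions question_counts out) := by unfold Spec_assign_question_type; infer_instance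

-- ===== CLAIM (what is proved, stated in full; the proofs are below) =====
def Claim_equal_assign_question_type : Prop := ∀ (generated_questions : List (List (String × String))) (question_counts : List (String × Int)), Dom_assign_question_type generated_questions question_counts → Spec_assign_question_type generated_questions question_counts (assign_question_type generated_questions question_counts)

-- ===== LEMMAS AND PROOFS =====

-- A's flat list of types
def pvFlat (counts : List (String × Int)) : List String :=
  counts.flatMap (fun p => List.replicate p.2.toNat p.1)

-- structural form of B's bounds table, starting from running total s
def pvBoundsRec (s : Int) : List (String × Int) → List (Int × String)
  | [] => []
  | (t, c) :: rest => (s + max c 0, t) :: pvBoundsRec (s + max c 0) rest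

lemma pvBounds_foldl (counts : List (String × Int)) (l : List (Int × String)) (s : Int) :
    counts.foldl
      (fun (acc : List (Int × String) × Int) p =>
        let total := acc.2 + max p.2 0
        (acc.1 ++ [(total, p.1)], total)) (l, s)
      = (l ++ pvBoundsRec s counts,
         s + ((counts.map (fun p => max p.2 0)).sum)) := by
  induction counts generalizing l s with
  | nil => simp [pvBoundsRec]
  | cons p rest ih =>
    obtain ⟨t, c⟩ := p
    simp [pvBoundsRec, ih, List.append_assoc]
    ring

-- looking up the first bound exceeding the rank is indexing into A's flat list
lemma pvFind_eq_flat (counts : List (String × Int)) (s : Int) (i : Nat) :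
    ((((pvBoundsRec s counts).find? (fun e => decide (s + (i : Int) < e.1))).map Prod.snd).getD "shortAnswer")
      = if i < (pvFlat counts).length then (pvFlat counts).getD i "" else "shortAnswer" := by
  induction counts generalizing s i with
  | nil => simp [pvBoundsRec, pvFlat]
  | cons p rest ih =>
    obtain ⟨t, c⟩ := p
    have hflat : pvFlat ((t, c) :: rest) = List.replicate c.toNat t ++ pvFlat rest := by
      simp [pvFlat]
    rw [hflat]
    simp only [pvBoundsRec]
    by_cases hi : i < c.toNat
    · rw [List.find?_cons_of_pos (by
        show decide (s + (i : Int) < s + max c 0) = true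
        simp only [decide_eq_true_eq]; omega)]
      simp only [Option.map_some, Option.getD_some]
      rw [if_pos (by simp only [List.length_append, List.length_replicate]; omega)]
      rw [List.getD_eq_getElem?_getD, List.getElem?_append_left (by simpa using hi)]
      simp [hi]
    · rw [List.find?_cons_of_neg (by
        show ¬ (decide (s + (i : Int) < s + max c 0) = true)
        simp only [decide_eq_true_eq]; omega)]
      have harg : s + (i : Int) = (s + max c 0) + ((i - c.toNat : Nat) : Int) := by
        omega
      rw [harg, ih]
      by_cases h2 : i - c.toNat < (pvFlat rest).length
      · rw [if_pos h2,
          if_pos (by simp only [List.length_append, List.length_replicate]; omega)]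
        rw [List.getD_eq_getElem?_getD, List.getD_eq_getElem?_getD,
          List.getElem?_append_right (by simpa using Nat.le_of_not_lt hi)]
        simp
      · rw [if_neg h2,
          if_neg (by simp only [List.length_append, List.length_replicate]; omega)]

-- canonical form both passes reduce to: assign the k-th type to the k-th question, pad with "shortAnswer"
def pvZipAssign : List (List (String × String)) → List String → List (List (String × String))
  | [], _ => []
  | q :: qs, [] => pvSetType q "shortAnswer" :: pvZipAssign qs []
  | q :: qs, t :: ts => pvSetType q t :: pvZipAssign qs ts

lemma pvZipAssign_getElem? (qs : List (List (String × String))) (ts : List String) (k : Nat) :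
    (pvZipAssign qs ts)[k]? =
      qs[k]?.map (fun q => pvSetType q (if k < ts.length then ts.getD k "" else "shortAnswer")) := by
  induction qs generalizing ts k with
  | nil => simp [pvZipAssign]
  | cons q qs ih =>
    cases ts with
    | nil =>
      cases k with
      | zero => simp [pvZipAssign]
      | succ k => simp [pvZipAssign, ih]
    | cons t ts =>
      cases k with
      | zero => simp [pvZipAssign]
      | succ k => simp [pvZipAssign, ih]

lemma pvEnumAssign_eq_zip (qs : List (List (String × String))) (ts : List String) :
    ((PySem.List.enumerate qs).map (fun p =>
        if p.1 < (ts.length : Int) then pvSetType p.2 (PySem.List.pyGetD ts p.1 "")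
        else pvSetType p.2 "shortAnswer")) = pvZipAssign qs ts := by
  apply List.ext_getElem?
  intro k
  rw [pvZipAssign_getElem?]
  rw [List.getElem?_map, PySem.List.getElem?_enumerate]
  cases h : qs[k]? with
  | none => simp
  | some q =>
    simp only [Option.map_some]
    by_cases hk : k < ts.length
    · simp [hk, PySem.List.pyGetD_natCast]
    · simp [hk]

lemma pvFindAssign_eq_zip (qs : List (List (String × String))) (counts : List (String × Int)) :
    ((PySem.List.enumerate qs).map (fun p =>
        pvSetType p.2 ((((pvBoundsRec 0 counts).find? (fun e => decide (p.1 < e.1))).map Prod.snd).getD "shortAnswer")))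
      = pvZipAssign qs (pvFlat counts) := by
  apply List.ext_getElem?
  intro k
  rw [pvZipAssign_getElem?]
  rw [List.getElem?_map, PySem.List.getElem?_enumerate]
  cases h : qs[k]? with
  | none => simp
  | some q =>
    simp only [Option.map_some, Option.some.injEq]
    have hf := pvFind_eq_flat counts 0 k
    simp only [zero_add] at hf ⊢
    rw [hf]

-- ===== VERDICT (by name: the statement is the Claim_ definition above) =====
theorem assign_question_type_spec : Claim_equal_assign_question_type := by
  intro gq qc _
  unfold Spec_assign_question_type assign_question_type assign_question_type_alt
  rw [PySem.List.foldl_append_eq_flatMap, List.nil_append, pvEnumAssign_eq_zip]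
  rw [pvBounds_foldl]
  simp only [List.nil_append]
  rw [pvFindAssign_eq_zip]
  rfl
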